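-- pv_equiv track=rewrite | github.com/a-merezhanyi/codewars | (4 kyu) Strip Comments/(4 kyu) Strip Comments.py | solution
-- ===== SOURCE A (Python) =====
-- def solution(string, markers):
--     str = string.split("\n")
--     res = [];
--     for s in str:
--         sub = s
--         for m in markers:
--             i = s.find(m)
--             if i != -1:
--                 sub = sub[:i]
--         res.append(sub.rstrip())
--     return "\n".join(res)
-- ===== SOURCE B (Python) =====
-- def solution(string, markers):
--     res = []
--     for line in string.split("\n"):
--         kept = line
--         for j in range(len(line) + 1):
--             if any(line.startswith(m, j) for m in markers):
--                 kept = line[:j]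
--                 break
--         res.append(kept.rstrip())
--     return "\n".join(res)
-- ===== Notes on version B (the rewrite author's own statement) =====
-- stated objective: alternative
-- what changed: A iterates over the markers, running find over the whole line for each marker and re-slicing the kept prefix after every hit; B scans each line left to right once and cuts at the first position where any marker starts (break on first hit), making the 'leftmost match of any marker' rule explicit.
import Mathlib
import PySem

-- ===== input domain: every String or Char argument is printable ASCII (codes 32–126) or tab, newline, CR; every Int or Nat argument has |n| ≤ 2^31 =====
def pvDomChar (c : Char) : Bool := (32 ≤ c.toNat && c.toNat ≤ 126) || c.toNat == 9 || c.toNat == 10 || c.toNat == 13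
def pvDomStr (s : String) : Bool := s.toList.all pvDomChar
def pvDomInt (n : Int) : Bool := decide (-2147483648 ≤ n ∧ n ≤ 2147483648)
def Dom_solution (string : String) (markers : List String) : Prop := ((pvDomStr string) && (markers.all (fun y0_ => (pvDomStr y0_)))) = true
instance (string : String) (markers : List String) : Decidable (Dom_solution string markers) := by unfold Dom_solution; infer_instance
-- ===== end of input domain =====

-- B replaces A's per-marker find/re-slice loop by a single left-to-right scan per
-- line that stops at the first position where any marker starts (alternative
-- decomposition, same cost class).

-- ===== PORT A =====
-- one iteration of A's inner 'for m in markers' loop: i = s.find(m); if i != -1: sub = sub[:i]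
def aStep (s : List Char) (sub : List Char) (m : String) : List Char :=
  if PySem.Chars.find s m.toList ≠ -1 then
    PySem.Chars.slice sub none (some (PySem.Chars.find s m.toList))
  else sub

-- body of A's outer loop for one line s: run the marker loop, then rstrip
def aLine (markers : List String) (s : List Char) : List Char :=
  PySem.Chars.rstrip (markers.foldl (aStep s) s)

def solution (string : String) (markers : List String) : String :=
  String.ofList (PySem.Chars.join "\n".toList
    ((PySem.Chars.splitOn string.toList "\n".toList).foldl
      (fun res s => res ++ [aLine markers s]) []))

-- ===== PORT B =====
-- Source B's inner scan: first j (0 ≤ j ≤ len line) with line.startswith(m, j) for some m; none if no break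
def cutScan (markers : List String) : List Char → Option Nat
  | [] => if markers.any (fun m => PySem.Chars.startswith [] m.toList) then some 0 else none
  | c :: rest =>
    if markers.any (fun m => PySem.Chars.startswith (c :: rest) m.toList) then some 0
    else (cutScan markers rest).map (· + 1)

-- body of Source B's loop for one line: kept = line[:j] on break else line; then rstrip
def bLine (markers : List String) (line : List Char) : List Char :=
  PySem.Chars.rstrip (match cutScan markers line with
    | some j => line.take j
    | none => line)

def solution_alt (string : String) (markers : List String) : String :=
  String.ofList (PySem.Chars.join "\n".toList
    ((PySem.Chars.splitOn string.toList "\n".toList).map (bLine markers)))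

-- ===== PRECONDITION & SPEC =====
def Spec_solution (string : String) (markers : List String) (out : String) : Prop := out = solution_alt string markers
instance (string : String) (markers : List String) (out : String) : Decidable (Spec_solution string markers out) := by unfold Spec_solution; infer_instance

-- ===== CLAIM (what is proved, stated in full; the proofs are below) =====
def Claim_equal_solution : Prop := ∀ (string : String) (markers : List String), Dom_solution string markers → Spec_solution string markers (solution string markers)

-- ===== LEMMAS AND PROOFS =====

-- the position A's loop slices at, for one marker (line length when the marker is absent)
def hCut (s : List Char) (m : String) : Nat :=
  if PySem.Chars.find s m.toList ≠ -1 then (PySem.Chars.find s m.toList).toNat else s.length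

-- the Nat mirror of one step of A's inner loop
def gStep (s : List Char) (n : Nat) (m : String) : Nat :=
  if PySem.Chars.find s m.toList ≠ -1 then min n (PySem.Chars.find s m.toList).toNat else n

lemma find_nonneg_of_ne (s : List Char) (m : String)
    (h : PySem.Chars.find s m.toList ≠ -1) : (0 : Int) ≤ PySem.Chars.find s m.toList := by
  have := PySem.Chars.neg_one_le_find s m.toList
  omega

-- A's inner loop, started from s.take n, is s.take (fold of gStep)
lemma foldA (s : List Char) (ms : List String) :
    ∀ n : Nat, ms.foldl (aStep s) (s.take n) = s.take (ms.foldl (gStep s) n) := by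
  induction ms with
  | nil => intro n; rfl
  | cons m t ih =>
    intro n
    have hstep : aStep s (s.take n) m = s.take (gStep s n m) := by
      unfold aStep gStep
      split_ifs with h
      · rw [PySem.Chars.slice_eq_listSlice, PySem.List.slice_to _ (find_nonneg_of_ne s m h),
          List.take_take, Nat.min_comm]
      · rfl
    simp only [List.foldl_cons, hstep, ih (gStep s n m)]

-- the gStep fold agrees with the min-of-hCut fold while the accumulator stays ≤ length
lemma fold_g_eq_fold_min (s : List Char) (ms : List String) :
    ∀ n : Nat, n ≤ s.length →
      ms.foldl (gStep s) n = ms.foldl (fun n m => min n (hCut s m)) n := by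
  induction ms with
  | nil => intro n _; rfl
  | cons m t ih =>
    intro n hn
    have hstep : gStep s n m = min n (hCut s m) := by
      unfold gStep hCut
      split_ifs with h
      · rfl
      · exact (Nat.min_eq_left hn).symm
    have hle : gStep s n m ≤ s.length := by
      rw [hstep]
      exact le_trans (Nat.min_le_left _ _) hn
    rw [List.foldl_cons, List.foldl_cons, ih (gStep s n m) hle, hstep]

-- min-fold of values all ≥ j, started at j, stays j
lemma foldMin_const (ms : List String) (s : List Char) (j : Nat)
    (hall : ∀ m ∈ ms, j ≤ hCut s m) :
    ms.foldl (fun n m => min n (hCut s m)) j = j := by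
  induction ms with
  | nil => rfl
  | cons m t ih =>
    simp only [List.foldl_cons]
    rw [Nat.min_eq_left (hall m (by simp))]
    exact ih (fun m' hm' => hall m' (by simp [hm']))

-- min-fold hits j when all values are ≥ j and one equals j
lemma foldMin_eq (ms : List String) (s : List Char) (j : Nat) :
    ∀ a : Nat, j ≤ a → (∀ m ∈ ms, j ≤ hCut s m) → (∃ m ∈ ms, hCut s m = j) →
    ms.foldl (fun n m => min n (hCut s m)) a = j := by
  induction ms with
  | nil => intro a _ _ hex; simp at hex
  | cons m t ih =>
    intro a hja hall hex
    simp only [List.foldl_cons]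
    rcases hex with ⟨m', hm', hval⟩
    rcases List.mem_cons.mp hm' with rfl | hmem
    · rw [hval, Nat.min_eq_right hja]
      exact foldMin_const t s j (fun m'' hm'' => hall m'' (by simp [hm'']))
    · exact ih (min a (hCut s m)) (le_min hja (hall m (by simp)))
        (fun m'' hm'' => hall m'' (by simp [hm''])) ⟨m', hmem, hval⟩

-- cutScan = none means no marker occurs as a prefix of any suffix
lemma cutScan_none (ms : List String) :
    ∀ t : List Char, cutScan ms t = none → ∀ j : Nat, ∀ m ∈ ms, ¬ m.toList <+: t.drop j := by
  intro t
  induction t with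
  | nil =>
    intro h j m hm
    simp only [cutScan] at h
    split_ifs at h with hany
    rw [Bool.not_eq_true] at hany
    have := List.any_eq_false.mp hany m hm
    simpa [PySem.Chars.startswith_iff] using this
  | cons c rest ih =>
    intro h j m hm
    simp only [cutScan] at h
    split_ifs at h with hany
    rw [Bool.not_eq_true] at hany
    have hnone : cutScan ms rest = none := by
      cases hc : cutScan ms rest with
      | none => rfl
      | some k => rw [hc] at h; simp at h
    cases j with
    | zero =>
      have := List.any_eq_false.mp hany m hm
      simpa [PySem.Chars.startswith_iff] using this
    | succ k =>
      simpa using ih hnone k m hm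

-- cutScan = some j: some marker starts at j, none strictly earlier
lemma cutScan_some (ms : List String) :
    ∀ t : List Char, ∀ j : Nat, cutScan ms t = some j →
      (∃ m ∈ ms, m.toList <+: t.drop j) ∧ (∀ i < j, ∀ m ∈ ms, ¬ m.toList <+: t.drop i) := by
  intro t
  induction t with
  | nil =>
    intro j h
    simp only [cutScan] at h
    split_ifs at h with hany
    rcases List.any_eq_true.mp hany with ⟨m, hm, hsw⟩
    have hj : j = 0 := by simpa using h.symm
    subst hj
    exact ⟨⟨m, hm, (PySem.Chars.startswith_iff _ _).mp hsw⟩, by omega⟩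
  | cons c rest ih =>
    intro j h
    simp only [cutScan] at h
    split_ifs at h with hany
    · rcases List.any_eq_true.mp hany with ⟨m, hm, hsw⟩
      have hj : j = 0 := by simpa using h.symm
      subst hj
      exact ⟨⟨m, hm, (PySem.Chars.startswith_iff _ _).mp hsw⟩, by omega⟩
    · cases hc : cutScan ms rest with
      | none => rw [hc] at h; simp at h
      | some k =>
        rw [hc] at h
        have hj : j = k + 1 := by simpa using h.symm
        subst hj
        obtain ⟨⟨m, hm, hpre⟩, hmin⟩ := ih k hc
        refine ⟨⟨m, hm, by simpa using hpre⟩, ?_⟩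
        intro i hi m' hm'
        cases i with
        | zero =>
          rw [Bool.not_eq_true] at hany
          have := List.any_eq_false.mp hany m' hm'
          simpa [PySem.Chars.startswith_iff] using this
        | succ i' =>
          have := hmin i' (by omega) m' hm'
          simpa using this

lemma cutScan_le_length (ms : List String) :
    ∀ t : List Char, ∀ j : Nat, cutScan ms t = some j → j ≤ t.length := by
  intro t
  induction t with
  | nil =>
    intro j h
    simp only [cutScan] at h
    split_ifs at h with hany
    have : j = 0 := by simpa using h.symm
    omega
  | cons c rest ih =>
    intro j h
    simp only [cutScan] at h
    split_ifs at h with hany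
    · have : j = 0 := by simpa using h.symm
      simp [this]
    · cases hc : cutScan ms rest with
      | none => rw [hc] at h; simp at h
      | some k =>
        rw [hc] at h
        have hjk : j = k + 1 := by simpa using h.symm
        have := ih k hc
        simp only [List.length_cons]
        omega

-- hCut of a present marker points at the first suffix it prefixes
lemma hCut_spec_found (s : List Char) (m : String)
    (h : PySem.Chars.find s m.toList ≠ -1) :
    m.toList <+: s.drop (hCut s m) ∧ ∀ i < hCut s m, ¬ m.toList <+: s.drop i := by
  have := PySem.Chars.find_spec (s := s) (sub := m.toList) (find_nonneg_of_ne s m h)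
  unfold hCut
  rw [if_pos h]
  exact this

lemma hCut_not_found (s : List Char) (m : String)
    (h : PySem.Chars.find s m.toList = -1) :
    ∀ j : Nat, ¬ m.toList <+: s.drop j := by
  intro j hpre
  have hin : PySem.Chars.isIn m.toList s = true :=
    (PySem.Chars.exists_prefix_drop_iff_isIn _ _).mp ⟨j, hpre⟩
  have : m.toList <:+: s := (PySem.Chars.isIn_iff_infix _ _).mp hin
  exact (PySem.Chars.find_eq_neg_one_iff _ _).mp h this

-- per line, A's loop body equals B's
lemma line_eq (markers : List String) (s : List Char) : aLine markers s = bLine markers s := by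
  unfold aLine bLine
  have hfold : markers.foldl (aStep s) s
      = s.take (markers.foldl (fun n m => min n (hCut s m)) s.length) := by
    have h1 := foldA s markers s.length
    rw [List.take_length, fold_g_eq_fold_min s markers s.length le_rfl] at h1
    exact h1
  cases hc : cutScan markers s with
  | none =>
    have hall : ∀ m ∈ markers, s.length ≤ hCut s m := by
      intro m hm
      unfold hCut
      split_ifs with hf
      · exact absurd ((hCut_spec_found s m hf).1) (cutScan_none markers s hc _ m hm)
      · exact le_rfl
    rw [hfold, foldMin_const markers s s.length hall, List.take_length]
  | some j =>
    obtain ⟨⟨m0, hm0, hpre0⟩, hmin⟩ := cutScan_some markers s j hc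
    have hjlen : j ≤ s.length := cutScan_le_length markers s j hc
    have hall : ∀ m ∈ markers, j ≤ hCut s m := by
      intro m hm
      by_cases hf : PySem.Chars.find s m.toList = -1
      · unfold hCut; simp [hf]; omega
      · by_contra hlt
        exact hmin (hCut s m) (by omega) m hm ((hCut_spec_found s m hf).1)
    have hex : ∃ m ∈ markers, hCut s m = j := by
      refine ⟨m0, hm0, ?_⟩
      have hf : PySem.Chars.find s m0.toList ≠ -1 := by
        intro hf
        exact hCut_not_found s m0 hf j hpre0
      have hle : hCut s m0 ≤ j := by
        by_contra hgt
        exact (hCut_spec_found s m0 hf).2 j (by omega) hpre0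
      exact Nat.le_antisymm hle (hall m0 hm0)
    rw [hfold, foldMin_eq markers s j s.length hjlen hall hex]

-- ===== VERDICT (by name: the statement is the Claim_ definition above) =====
theorem solution_spec : Claim_equal_solution := by
  intro string markers _
  unfold Spec_solution solution solution_alt
  rw [PySem.List.foldl_append_singleton_eq_map, List.nil_append,
    funext (line_eq markers)]
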